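-- pv_equiv track=rewrite | github.com/mostly-coherent/Inspiration | engine/generate_themes.py | _extract_best_snippet
-- ===== SOURCE A (Python) =====
-- def _extract_best_snippet(messages: list[dict], max_length: int = 300) -> str:
--     """Extract the most interesting snippet from a conversation."""
--     # Prefer messages with code blocks or errors
--     for msg in messages:
--         text = msg.get("text", "")
--         if "```" in text or "error" in text.lower() or "exception" in text.lower():
--             # Truncate to max_length
--             if len(text) > max_length:
--                 return text[:max_length] + "..."
--             return text
--
--     # Fallback: first assistant response
--     for msg in messages:
--         if msg.get("type") == "assistant":
--             text = msg.get("text", "")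
--             if len(text) > max_length:
--                 return text[:max_length] + "..."
--             return text
--
--     # Last resort: first message
--     if messages:
--         text = messages[0].get("text", "")
--         if len(text) > max_length:
--             return text[:max_length] + "..."
--         return text
--
--     return ""
-- ===== SOURCE B (Python) =====
-- def _extract_best_snippet(messages: list[dict], max_length: int = 300) -> str:
--     """Extract the most interesting snippet from a conversation."""
--     def truncate(text):
--         return text[:max_length] + "..." if len(text) > max_length else text
--
--     interesting = None
--     assistant = None
--     for msg in messages:
--         text = msg.get("text", "")
--         low = text.lower()
--         if interesting is None and ("```" in text or "error" in low or "exception" in low):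
--             interesting = text
--         if assistant is None and msg.get("type") == "assistant":
--             assistant = text
--
--     if interesting is not None:
--         return truncate(interesting)
--     if assistant is not None:
--         return truncate(assistant)
--     if messages:
--         return truncate(messages[0].get("text", ""))
--     return ""
-- ===== Notes on version B (the rewrite author's own statement) =====
-- stated objective: simpler
-- what changed: Replaces A's three sequential scans each with its own inline truncation by a single pass recording the first interesting and the first assistant message, then one shared truncation helper.
import Mathlib
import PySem

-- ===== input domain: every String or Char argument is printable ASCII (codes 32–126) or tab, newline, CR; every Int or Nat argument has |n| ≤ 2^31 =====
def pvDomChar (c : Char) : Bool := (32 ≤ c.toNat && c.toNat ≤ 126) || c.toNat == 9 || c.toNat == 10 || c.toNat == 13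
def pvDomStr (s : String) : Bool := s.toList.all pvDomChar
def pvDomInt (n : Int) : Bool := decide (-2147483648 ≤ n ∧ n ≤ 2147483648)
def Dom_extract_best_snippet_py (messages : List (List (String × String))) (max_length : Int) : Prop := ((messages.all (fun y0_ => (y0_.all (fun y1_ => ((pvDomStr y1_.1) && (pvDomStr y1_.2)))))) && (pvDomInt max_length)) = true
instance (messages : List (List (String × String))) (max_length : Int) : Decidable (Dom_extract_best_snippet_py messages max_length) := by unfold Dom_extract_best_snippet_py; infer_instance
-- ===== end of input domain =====

-- B replaces A's three sequential scans (each with its own inline truncation) by a single pass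
-- recording the first interesting and the first assistant message, plus one shared truncation helper.

-- ===== PORT A =====
-- A's interesting-message test, inline as in the Python source
-- first loop of A: return truncated text of the first interesting message
def pvALoop1 (messages : List (List (String × String))) (max_length : Int) : Option String :=
  match messages with
  | [] => none
  | msg :: rest =>
    let text := PySem.Dict.getD (PySem.Dict.mk msg) "text" ""
    if PySem.Str.isIn "```" text || PySem.Str.isIn "error" (PySem.Str.lower text)
        || PySem.Str.isIn "exception" (PySem.Str.lower text) then
      some (if max_length < (PySem.Str.len text : Int) then
              PySem.Str.join "" [PySem.Str.slice text none (some max_length), "..."]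
            else text)
    else pvALoop1 rest max_length

-- second loop of A: truncated text of the first assistant message
def pvALoop2 (messages : List (List (String × String))) (max_length : Int) : Option String :=
  match messages with
  | [] => none
  | msg :: rest =>
    if PySem.Dict.get? (PySem.Dict.mk msg) "type" == some "assistant" then
      let text := PySem.Dict.getD (PySem.Dict.mk msg) "text" ""
      some (if max_length < (PySem.Str.len text : Int) then
              PySem.Str.join "" [PySem.Str.slice text none (some max_length), "..."]
            else text)
    else pvALoop2 rest max_length

def extract_best_snippet_py (messages : List (List (String × String))) (max_length : Int) : String :=
  match pvALoop1 messages max_length with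
  | some r => r
  | none =>
    match pvALoop2 messages max_length with
    | some r => r
    | none =>
      match messages with
      | [] => ""
      | msg :: _ =>
        let text := PySem.Dict.getD (PySem.Dict.mk msg) "text" ""
        if max_length < (PySem.Str.len text : Int) then
          PySem.Str.join "" [PySem.Str.slice text none (some max_length), "..."]
        else text

-- ===== PORT B =====
-- shared truncation helper of B
def pvBTrunc (max_length : Int) (text : String) : String :=
  if max_length < (PySem.Str.len text : Int) then
    PySem.Str.join "" [PySem.Str.slice text none (some max_length), "..."]
  else text

-- B's single pass: fold carrying (first interesting, first assistant)
def pvBStep (st : Option String × Option String) (msg : List (String × String)) :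
    Option String × Option String :=
  let text := PySem.Dict.getD (PySem.Dict.mk msg) "text" ""
  let low := PySem.Str.lower text
  let interesting :=
    if st.1.isNone && (PySem.Str.isIn "```" text || PySem.Str.isIn "error" low
        || PySem.Str.isIn "exception" low) then some text else st.1
  let assistant :=
    if st.2.isNone && (PySem.Dict.get? (PySem.Dict.mk msg) "type" == some "assistant") then
      some text
    else st.2
  (interesting, assistant)

def extract_best_snippet_py_alt (messages : List (List (String × String))) (max_length : Int) : String :=
  let st := messages.foldl pvBStep (none, none)
  match st.1 with
  | some t => pvBTrunc max_length t
  | none =>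
    match st.2 with
    | some t => pvBTrunc max_length t
    | none =>
      match messages with
      | [] => ""
      | msg :: _ => pvBTrunc max_length (PySem.Dict.getD (PySem.Dict.mk msg) "text" "")

-- ===== PRECONDITION & SPEC =====
def Spec_extract_best_snippet_py (messages : List (List (String × String))) (max_length : Int) (out : String) : Prop := out = extract_best_snippet_py_alt messages max_length
instance (messages : List (List (String × String))) (max_length : Int) (out : String) : Decidable (Spec_extract_best_snippet_py messages max_length out) := by unfold Spec_extract_best_snippet_py; infer_instance

-- ===== CLAIM (what is proved, stated in full; the proofs are below) =====
def Claim_equal_extract_best_snippet_py : Prop := ∀ (messages : List (List (String × String))) (max_length : Int), Dom_extract_best_snippet_py messages max_length → Spec_extract_best_snippet_py messages max_length (extract_best_snippet_py messages max_length)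

-- ===== LEMMAS AND PROOFS =====

-- the untruncated first interesting / first assistant texts
def pvFInt (messages : List (List (String × String))) : Option String :=
  match messages with
  | [] => none
  | msg :: rest =>
    let text := PySem.Dict.getD (PySem.Dict.mk msg) "text" ""
    if PySem.Str.isIn "```" text || PySem.Str.isIn "error" (PySem.Str.lower text)
        || PySem.Str.isIn "exception" (PySem.Str.lower text) then some text
    else pvFInt rest

def pvFAsst (messages : List (List (String × String))) : Option String :=
  match messages with
  | [] => none
  | msg :: rest =>
    if PySem.Dict.get? (PySem.Dict.mk msg) "type" == some "assistant" then
      some (PySem.Dict.getD (PySem.Dict.mk msg) "text" "")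
    else pvFAsst rest

theorem pvALoop1_eq (messages : List (List (String × String))) (max_length : Int) :
    pvALoop1 messages max_length = (pvFInt messages).map (pvBTrunc max_length) := by
  induction messages with
  | nil => rfl
  | cons msg rest ih =>
    simp only [pvALoop1, pvFInt]
    split_ifs with h1 h2
    · rw [Option.map_some]; unfold pvBTrunc; rw [if_pos h2]
    · rw [Option.map_some]; unfold pvBTrunc; rw [if_neg h2]
    · exact ih

theorem pvALoop2_eq (messages : List (List (String × String))) (max_length : Int) :
    pvALoop2 messages max_length = (pvFAsst messages).map (pvBTrunc max_length) := by
  induction messages with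
  | nil => rfl
  | cons msg rest ih =>
    simp only [pvALoop2, pvFAsst]
    split_ifs with h1 h2
    · rw [Option.map_some]; unfold pvBTrunc; rw [if_pos h2]
    · rw [Option.map_some]; unfold pvBTrunc; rw [if_neg h2]
    · exact ih

theorem pvFold_eq (messages : List (List (String × String))) :
    ∀ i a : Option String, messages.foldl pvBStep (i, a)
      = (i.orElse (fun _ => pvFInt messages), a.orElse (fun _ => pvFAsst messages)) := by
  induction messages with
  | nil => intro i a; cases i <;> cases a <;> rfl
  | cons msg rest ih =>
    intro i a
    rw [List.foldl_cons, ih]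
    simp only [pvBStep, pvFInt, pvFAsst]
    cases i <;> cases a <;> simp [Option.orElse] <;> split_ifs <;> simp_all

-- ===== VERDICT (by name: the statement is the Claim_ definition above) =====
theorem extract_best_snippet_py_spec : Claim_equal_extract_best_snippet_py := by
  intro messages max_length _
  unfold Spec_extract_best_snippet_py extract_best_snippet_py extract_best_snippet_py_alt
  rw [pvALoop1_eq, pvALoop2_eq, pvFold_eq]
  cases hI : pvFInt messages <;> cases hA : pvFAsst messages <;>
    cases messages <;> simp [Option.orElse, pvBTrunc]
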